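-- pv_equiv track=rewrite | github.com/kaiwenHong/CS440 | CS440MP5 - HMM/backup_2.py | build_emission_probabilities
-- ===== SOURCE A (Python) =====
-- def build_emission_probabilities(train):
--     emission_probabilities = {}
--     for each_line in train:
--         for each_word, each_tag in each_line:
--             if each_word in emission_probabilities:
--                 each_word_map = emission_probabilities.get(each_word)
--                 each_word_map[each_tag] = each_word_map.get(each_tag, 0) + 1
--                 emission_probabilities[each_word] = each_word_map
--             else:
--                 emission_probabilities[each_word] = {each_tag:1}
--     return emission_probabilities
-- ===== SOURCE B (Python) =====
-- def build_emission_probabilities(train):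
--     # Pass 1: flat counting keyed by the (word, tag) pair.
--     counts = {}
--     for each_line in train:
--         for each_word, each_tag in each_line:
--             counts[(each_word, each_tag)] = counts.get((each_word, each_tag), 0) + 1
--     # Pass 2: reshape the flat counts into the nested word -> {tag: count} dict.
--     emission_probabilities = {}
--     for (each_word, each_tag), count in counts.items():
--         emission_probabilities.setdefault(each_word, {})[each_tag] = count
--     return emission_probabilities
-- ===== Notes on version B (the rewrite author's own statement) =====
-- stated objective: alternative
-- what changed: Replaces A's single nested accumulation (per-word inner dicts updated in place during the scan) by a two-pass pipeline: first a flat count keyed by the (word, tag) pair, then a reshaping pass that distributes the flat counts into the nested word->tag dict.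
import Mathlib
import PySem

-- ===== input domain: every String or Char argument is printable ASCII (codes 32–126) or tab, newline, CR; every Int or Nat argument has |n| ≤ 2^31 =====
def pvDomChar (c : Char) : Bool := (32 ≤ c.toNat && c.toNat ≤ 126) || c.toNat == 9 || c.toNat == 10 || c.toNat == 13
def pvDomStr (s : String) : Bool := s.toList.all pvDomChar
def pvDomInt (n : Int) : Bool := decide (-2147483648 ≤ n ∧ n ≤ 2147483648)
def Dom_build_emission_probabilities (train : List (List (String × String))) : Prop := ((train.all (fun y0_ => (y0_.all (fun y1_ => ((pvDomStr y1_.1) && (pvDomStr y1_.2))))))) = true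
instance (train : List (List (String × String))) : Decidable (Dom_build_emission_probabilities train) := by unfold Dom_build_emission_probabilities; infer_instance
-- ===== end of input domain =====

-- B replaces A's single nested accumulation by a two-pass pipeline (flat (word,tag) counting,
-- then a reshaping pass into the nested dict); objective: alternative decomposition, same cost.

-- ===== PORT A =====
-- one body of A's inner loop: the if/else on 'each_word in emission_probabilities'
def bep_stepA (ep : PySem.Dict String (PySem.Dict String Int)) (wt : String × String) :
    PySem.Dict String (PySem.Dict String Int) :=
  match ep.get? wt.1 with
  | some m => ep.insert wt.1 (m.insert wt.2 (m.getD wt.2 0 + 1))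
  | none   => ep.insert wt.1 (PySem.Dict.ofList [(wt.2, 1)])

def build_emission_probabilities (train : List (List (String × String))) :
    List (String × List (String × Int)) :=
  let ep := train.foldl (fun ep line => line.foldl bep_stepA ep) PySem.Dict.empty
  ep.items.map (fun p => (p.1, p.2.items))

-- ===== PORT B =====
-- counts[(w,t)] = counts.get((w,t), 0) + 1
def bep_countStep (c : PySem.Dict (String × String) Int) (wt : String × String) :
    PySem.Dict (String × String) Int :=
  c.insert wt (c.getD wt 0 + 1)

-- emission_probabilities.setdefault(word, {})[tag] = count  (in-place mutation rendered as re-insert)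
def bep_reshapeStep (ep : PySem.Dict String (PySem.Dict String Int))
    (p : (String × String) × Int) : PySem.Dict String (PySem.Dict String Int) :=
  ep.insert p.1.1 ((ep.getD p.1.1 PySem.Dict.empty).insert p.1.2 p.2)

def build_emission_probabilities_alt (train : List (List (String × String))) :
    List (String × List (String × Int)) :=
  let counts := train.foldl (fun c line => line.foldl bep_countStep c) PySem.Dict.empty
  let ep := counts.items.foldl bep_reshapeStep PySem.Dict.empty
  ep.items.map (fun p => (p.1, p.2.items))

-- ===== PRECONDITION & SPEC =====
def Spec_build_emission_probabilities (train : List (List (String × String))) (out : List (String × List (String × Int))) : Prop := out = build_emission_probabilities_alt train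
instance (train : List (List (String × String))) (out : List (String × List (String × Int))) : Decidable (Spec_build_emission_probabilities train out) := by unfold Spec_build_emission_probabilities; infer_instance

-- ===== CLAIM (what is proved, stated in full; the proofs are below) =====
def Claim_equal_build_emission_probabilities : Prop := ∀ (train : List (List (String × String))), Dom_build_emission_probabilities train → Spec_build_emission_probabilities train (build_emission_probabilities train)

-- ===== LEMMAS AND PROOFS =====

-- Closed form of A's accumulator after the token stream ps: words in first-occurrence order,
-- each word's tags in first-occurrence order of the (word, tag) pair, valued by the pair's count.
def bep_wordsP (ps : List (String × String)) : List String :=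
  PySem.Set.ofList (ps.map Prod.fst)

def bep_tagsP (ps : List (String × String)) (w : String) : List (String × Int) :=
  ((PySem.Set.ofList ps).filter (fun q => q.1 == w)).map (fun q => (q.2, (ps.count q : Int)))

def bep_dictA (ps : List (String × String)) : PySem.Dict String (PySem.Dict String Int) :=
  PySem.Dict.mk ((bep_wordsP ps).map (fun w => (w, PySem.Dict.mk (bep_tagsP ps w))))

-- Closed form of B's reshape of a flat item list l (keys assumed Nodup).
def bep_dictG (l : List ((String × String) × Int)) : PySem.Dict String (PySem.Dict String Int) :=
  PySem.Dict.mk ((PySem.Set.ofList (l.map (fun p => p.1.1))).map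
    (fun w => (w, PySem.Dict.mk ((l.filter (fun p => p.1.1 == w)).map (fun p => (p.1.2, p.2))))))

lemma bep_get?_mk_map_none {κ ν α : Type} [BEq κ] [LawfulBEq κ] (xs : List α) (k : α → κ)
    (v : α → ν) (x : κ) (h : x ∉ xs.map k) :
    (PySem.Dict.mk (xs.map (fun a => (k a, v a)))).get? x = none := by
  induction xs with
  | nil => rfl
  | cons b xs ih =>
    simp only [List.map_cons, PySem.Dict.get?_mk_cons]
    simp only [List.map_cons, List.mem_cons, not_or] at h
    rw [if_neg (by simpa using fun e => h.1 e.symm)]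
    exact ih h.2

lemma bep_get?_mk_map_mem {κ ν α : Type} [BEq κ] [LawfulBEq κ] (xs : List α) (k : α → κ)
    (v : α → ν) (a : α) (hn : (xs.map k).Nodup) (ha : a ∈ xs) :
    (PySem.Dict.mk (xs.map (fun a => (k a, v a)))).get? (k a) = some (v a) := by
  induction xs with
  | nil => cases ha
  | cons b xs ih =>
    simp only [List.map_cons, PySem.Dict.get?_mk_cons]
    simp only [List.map_cons, List.nodup_cons] at hn
    by_cases he : k b = k a
    · rw [if_pos (by simpa using he)]
      rcases List.mem_cons.1 ha with rfl | hmem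
      · rfl
      · exact absurd (he ▸ List.mem_map_of_mem hmem) hn.1
    · rw [if_neg (by simpa using he)]
      rcases List.mem_cons.1 ha with rfl | hmem
      · exact absurd rfl he
      · exact ih hn.2 hmem

lemma bep_setOfList_snoc {α : Type} [BEq α] [LawfulBEq α] (xs : List α) (x : α) :
    PySem.Set.ofList (xs ++ [x]) =
      if x ∈ xs then PySem.Set.ofList xs else PySem.Set.ofList xs ++ [x] := by
  rw [PySem.Set.ofList_eq_foldl, List.foldl_append, ← PySem.Set.ofList_eq_foldl]
  simp only [List.foldl_cons, List.foldl_nil, PySem.Set.add]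
  split_ifs with h1 h2 h2 <;> try rfl
  · exact absurd ((PySem.Set.mem_ofList xs x).1 (by simpa using h1)) h2
  · exact absurd (by simpa using (PySem.Set.mem_ofList xs x).2 h2) h1

-- tags list of a word w' untouched by appending a token (w,t) with w' ≠ w
lemma bep_tagsP_snoc_ne (ps : List (String × String)) (w t w' : String) (hne : w' ≠ w) :
    bep_tagsP (ps ++ [(w, t)]) w' = bep_tagsP ps w' := by
  unfold bep_tagsP
  rw [bep_setOfList_snoc]
  have hcount : ∀ q : String × String, q.1 = w' →
      ((ps ++ [(w, t)]).count q : Int) = (ps.count q : Int) := by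
    intro q hq
    have hne' : q ≠ (w, t) := by intro h; rw [h] at hq; exact hne hq.symm
    have hne2 : ¬((w, t) = q) := fun h => hne' h.symm
    simp [List.count_append, hne2]
  split_ifs with h
  · exact List.map_congr_left (fun q hq => by
      have := (List.mem_filter.1 hq).2
      rw [hcount q (by simpa using this)])
  · rw [List.filter_append]
    have : List.filter (fun q => q.1 == w') [(w, t)] = [] := by simp [hne.symm]
    rw [this, List.append_nil]
    exact List.map_congr_left (fun q hq => by
      have := (List.mem_filter.1 hq).2
      rw [hcount q (by simpa using this)])

lemma bep_dictA_snoc (ps : List (String × String)) (wt : String × String) :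
    bep_stepA (bep_dictA ps) wt = bep_dictA (ps ++ [wt]) := by
  obtain ⟨w, t⟩ := wt
  have hwords_nodup : (bep_wordsP ps).Nodup := PySem.Set.nodup_ofList _
  have hSnodup : ((PySem.Set.ofList ps).filter (fun q => q.1 == w)).Nodup :=
    (PySem.Set.nodup_ofList ps).filter _
  have hSfst : ∀ q ∈ (PySem.Set.ofList ps).filter (fun q => q.1 == w), q.1 = w := by
    intro q hq; simpa using (List.mem_filter.1 hq).2
  by_cases hw : w ∈ ps.map Prod.fst
  · -- word already present
    have hget : (bep_dictA ps).get? w = some (PySem.Dict.mk (bep_tagsP ps w)) := by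
      have := bep_get?_mk_map_mem (bep_wordsP ps) (fun w => w)
        (fun w => PySem.Dict.mk (bep_tagsP ps w)) w
        (by simpa using hwords_nodup) (by simpa [bep_wordsP, PySem.Set.mem_ofList] using hw)
      simpa [bep_dictA] using this
    have hS2 : (((PySem.Set.ofList ps).filter (fun q => q.1 == w)).map (fun q => q.2)).Nodup := by
      refine List.Nodup.map_on ?_ hSnodup
      intro q1 h1 q2 h2 he
      have e1 := hSfst q1 h1; have e2 := hSfst q2 h2
      exact Prod.ext (by rw [e1, e2]) he
    have hcontains : (bep_dictA ps).contains w = true := by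
      rw [PySem.Dict.contains_eq_isSome_get?, hget]; rfl
    have hwords : bep_wordsP (ps ++ [(w, t)]) = bep_wordsP ps := by
      unfold bep_wordsP
      rw [List.map_append, List.map_singleton, bep_setOfList_snoc]
      simp [hw]
    set m := PySem.Dict.mk (bep_tagsP ps w) with hm
    have inner_eq : m.insert t (m.getD t 0 + 1) = PySem.Dict.mk (bep_tagsP (ps ++ [(w, t)]) w) := by
      by_cases hp : (w, t) ∈ ps
      · have hqS : (w, t) ∈ (PySem.Set.ofList ps).filter (fun q => q.1 == w) :=
          List.mem_filter.2 ⟨(PySem.Set.mem_ofList ps _).2 hp, by simp⟩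
        have hgett : m.get? t = some ((ps.count (w, t) : Int)) := by
          have := bep_get?_mk_map_mem ((PySem.Set.ofList ps).filter (fun q => q.1 == w))
            (fun q => q.2) (fun q => ((ps.count q : Int))) (w, t) hS2 hqS
          simpa [hm, bep_tagsP] using this
        have hct : m.contains t = true := by
          rw [PySem.Dict.contains_eq_isSome_get?, hgett]; rfl
        have hgetD : m.getD t 0 = (ps.count (w, t) : Int) := by
          rw [PySem.Dict.getD_eq_get?_getD, hgett]; rfl
        apply PySem.Dict.ext
        rw [PySem.Dict.items_insert_of_contains _ _ hct, hgetD]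
        show (bep_tagsP ps w).map _ = bep_tagsP (ps ++ [(w, t)]) w
        unfold bep_tagsP
        rw [bep_setOfList_snoc, if_pos hp, List.map_map]
        refine List.map_congr_left (fun q hq => ?_)
        have hq1 : q.1 = w := hSfst q hq
        by_cases h2 : q.2 = t
        · have hqe : q = (w, t) := Prod.ext hq1 h2
          simp [Function.comp, h2, hqe, List.count_append]
        · have hqe : ¬((w, t) = q) := fun h => h2 (by rw [← h])
          simp [Function.comp, h2, List.count_append, hqe]
      · have htnot : t ∉ (((PySem.Set.ofList ps).filter (fun q => q.1 == w)).map (fun q => q.2)) := by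
          intro hmem
          obtain ⟨q, hq, hq2⟩ := List.mem_map.1 hmem
          have hq1 : q.1 = w := hSfst q hq
          have : q = (w, t) := Prod.ext hq1 hq2
          exact hp (this ▸ (PySem.Set.mem_ofList ps q).1 (List.mem_filter.1 hq).1)
        have hgett : m.get? t = none := by
          have := bep_get?_mk_map_none ((PySem.Set.ofList ps).filter (fun q => q.1 == w))
            (fun q => q.2) (fun q => ((ps.count q : Int))) t htnot
          simpa [hm, bep_tagsP] using this
        have hct : m.contains t = false := by
          rw [PySem.Dict.contains_eq_isSome_get?, hgett]; rfl
        have hgetD : m.getD t 0 = 0 := by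
          rw [PySem.Dict.getD_eq_get?_getD, hgett]; rfl
        apply PySem.Dict.ext
        rw [PySem.Dict.items_insert_of_not_contains _ _ hct, hgetD]
        show bep_tagsP ps w ++ [(t, 0 + 1)] = bep_tagsP (ps ++ [(w, t)]) w
        unfold bep_tagsP
        rw [bep_setOfList_snoc, if_neg hp, List.filter_append]
        have hfl : List.filter (fun q => q.1 == w) [(w, t)] = [(w, t)] := by simp
        rw [hfl, List.map_append]
        congr 1
        · refine List.map_congr_left (fun q hq => ?_)
          have hqps : q ∈ ps := (PySem.Set.mem_ofList ps q).1 (List.mem_filter.1 hq).1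
          have hqe : ¬((w, t) = q) := fun h => hp (h ▸ hqps)
          simp [List.count_append, hqe]
        · simp [List.count_append, List.count_eq_zero.2 hp]
    unfold bep_stepA
    rw [hget]
    show (bep_dictA ps).insert w (m.insert t (m.getD t 0 + 1)) = _
    rw [inner_eq]
    apply PySem.Dict.ext
    rw [PySem.Dict.items_insert_of_contains _ _ hcontains]
    show ((bep_wordsP ps).map _).map _ = (bep_dictA (ps ++ [(w, t)])).items
    unfold bep_dictA
    rw [hwords, List.map_map]
    refine List.map_congr_left (fun w' hw' => ?_)
    by_cases he : w' = w
    · simp [Function.comp, he]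
    · have : ¬((w' == w) = true) := by simpa using he
      simp only [Function.comp]
      rw [bep_tagsP_snoc_ne ps w t w' he]
      simp [he]
  · -- fresh word
    have hget : (bep_dictA ps).get? w = none := by
      have := bep_get?_mk_map_none (bep_wordsP ps) (fun w => w)
        (fun w => PySem.Dict.mk (bep_tagsP ps w)) w
        (by simpa [bep_wordsP, PySem.Set.mem_ofList] using hw)
      simpa [bep_dictA] using this
    have hpair : (w, t) ∉ ps := fun h => hw (List.mem_map_of_mem h)
    have hcontains : (bep_dictA ps).contains w = false := by
      rw [PySem.Dict.contains_eq_isSome_get?, hget]; rfl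
    unfold bep_stepA
    rw [hget]
    apply PySem.Dict.ext
    rw [PySem.Dict.items_insert_of_not_contains _ _ hcontains]
    have hwords : bep_wordsP (ps ++ [(w, t)]) = bep_wordsP ps ++ [w] := by
      unfold bep_wordsP
      rw [List.map_append, List.map_singleton, bep_setOfList_snoc]
      simp [hw]
    show _ = (bep_dictA (ps ++ [(w, t)])).items
    unfold bep_dictA
    rw [hwords, List.map_append, List.map_singleton]
    congr 1
    · exact List.map_congr_left (fun w' hw' => by
        have hne : w' ≠ w := fun h => hw (by simpa [bep_wordsP, PySem.Set.mem_ofList, h] using hw')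
        rw [bep_tagsP_snoc_ne ps w t w' hne])
    · -- new entry
      have hempty : (PySem.Set.ofList ps).filter (fun q => q.1 == w) = [] := by
        rw [List.filter_eq_nil_iff]
        intro q hq hq1
        have h1 : q.1 = w := by simpa using hq1
        exact hw (h1 ▸ List.mem_map_of_mem ((PySem.Set.mem_ofList ps q).1 hq))
      have : bep_tagsP (ps ++ [(w, t)]) w = [(t, 1)] := by
        unfold bep_tagsP
        rw [bep_setOfList_snoc, if_neg hpair, List.filter_append, hempty]
        simp [List.count_eq_zero.2 hpair]
      rw [this]
      rfl

lemma bep_foldA (ps : List (String × String)) :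
    ps.foldl bep_stepA PySem.Dict.empty = bep_dictA ps := by
  induction ps using List.reverseRecOn with
  | nil => rfl
  | append_singleton ps wt ih =>
    rw [List.foldl_append, List.foldl_cons, List.foldl_nil, ih, bep_dictA_snoc]

lemma bep_dictG_snoc (l : List ((String × String) × Int)) (p : (String × String) × Int)
    (hp : p.1 ∉ l.map Prod.fst) :
    bep_reshapeStep (bep_dictG l) p = bep_dictG (l ++ [p]) := by
  obtain ⟨⟨w, t⟩, v⟩ := p
  simp only at hp
  have hwnodup : (PySem.Set.ofList (l.map (fun p => p.1.1))).Nodup := PySem.Set.nodup_ofList _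
  have hfl1 : List.filter (fun q => q.1.1 == w) [((w, t), v)] = [((w, t), v)] := by simp
  by_cases hw : w ∈ l.map (fun p => p.1.1)
  · have hget : (bep_dictG l).get? w =
        some (PySem.Dict.mk ((l.filter (fun p => p.1.1 == w)).map (fun p => (p.1.2, p.2)))) := by
      have := bep_get?_mk_map_mem (PySem.Set.ofList (l.map (fun p => p.1.1))) (fun w => w)
        (fun w => PySem.Dict.mk ((l.filter (fun p => p.1.1 == w)).map (fun p => (p.1.2, p.2)))) w
        (by simpa using hwnodup) ((PySem.Set.mem_ofList _ _).2 hw)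
      simpa [bep_dictG] using this
    have hcontains : (bep_dictG l).contains w = true := by
      rw [PySem.Dict.contains_eq_isSome_get?, hget]; rfl
    have hgetD : (bep_dictG l).getD w PySem.Dict.empty =
        PySem.Dict.mk ((l.filter (fun p => p.1.1 == w)).map (fun p => (p.1.2, p.2))) := by
      rw [PySem.Dict.getD_eq_get?_getD, hget]; rfl
    have htnot : t ∉ ((l.filter (fun p => p.1.1 == w)).map (fun p => p.1.2)) := by
      intro hmem
      obtain ⟨q, hq, hq2⟩ := List.mem_map.1 hmem
      have hq1 : q.1.1 = w := by simpa using (List.mem_filter.1 hq).2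
      exact hp (by
        have : q.1 = (w, t) := Prod.ext hq1 hq2
        exact this ▸ List.mem_map_of_mem (List.mem_filter.1 hq).1)
    have hct : (PySem.Dict.mk ((l.filter (fun p => p.1.1 == w)).map
        (fun p => (p.1.2, p.2)))).contains t = false := by
      rw [PySem.Dict.contains_eq_isSome_get?,
        bep_get?_mk_map_none (l.filter (fun p => p.1.1 == w)) (fun p => p.1.2) (fun p => p.2) t htnot]
      rfl
    have hwords : PySem.Set.ofList ((l ++ [((w, t), v)]).map (fun p => p.1.1)) =
        PySem.Set.ofList (l.map (fun p => p.1.1)) := by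
      rw [List.map_append, List.map_singleton, bep_setOfList_snoc]
      simp [hw]
    unfold bep_reshapeStep
    simp only
    rw [hgetD]
    apply PySem.Dict.ext
    rw [PySem.Dict.items_insert_of_contains _ _ hcontains]
    show ((PySem.Set.ofList (l.map (fun p => p.1.1))).map _).map _
      = (bep_dictG (l ++ [((w, t), v)])).items
    unfold bep_dictG
    rw [hwords, List.map_map]
    refine List.map_congr_left (fun w' hw' => ?_)
    by_cases he : w' = w
    · subst he
      simp only [Function.comp, if_pos (by simp : (w' == w') = true)]
      have : (PySem.Dict.mk ((l.filter (fun p => p.1.1 == w')).map (fun p => (p.1.2, p.2)))).insert t v =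
          PySem.Dict.mk (((l ++ [((w', t), v)]).filter (fun p => p.1.1 == w')).map
            (fun p => (p.1.2, p.2))) := by
        apply PySem.Dict.ext
        rw [PySem.Dict.items_insert_of_not_contains _ _ hct]
        show _ = ((l ++ [((w', t), v)]).filter (fun p => p.1.1 == w')).map (fun p => (p.1.2, p.2))
        rw [List.filter_append, hfl1, List.map_append]
        rfl
      rw [this]
    · have hne : ¬((w' == w) = true) := by simpa using he
      simp only [Function.comp, if_neg hne]
      rw [List.filter_append]
      have hne2 : ¬(w = w') := fun h => he h.symm
      have : List.filter (fun q => q.1.1 == w') [((w, t), v)] = [] := by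
        simp [hne2]
      rw [this, List.append_nil]
  · have hget : (bep_dictG l).get? w = none := by
      have := bep_get?_mk_map_none (PySem.Set.ofList (l.map (fun p => p.1.1))) (fun w => w)
        (fun w => PySem.Dict.mk ((l.filter (fun p => p.1.1 == w)).map (fun p => (p.1.2, p.2)))) w
        (by simpa [PySem.Set.mem_ofList] using hw)
      simpa [bep_dictG] using this
    have hcontains : (bep_dictG l).contains w = false := by
      rw [PySem.Dict.contains_eq_isSome_get?, hget]; rfl
    have hgetD : (bep_dictG l).getD w PySem.Dict.empty = PySem.Dict.empty := by
      rw [PySem.Dict.getD_eq_get?_getD, hget]; rfl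
    have hwords : PySem.Set.ofList ((l ++ [((w, t), v)]).map (fun p => p.1.1)) =
        PySem.Set.ofList (l.map (fun p => p.1.1)) ++ [w] := by
      rw [List.map_append, List.map_singleton, bep_setOfList_snoc]
      simp [hw]
    have hempty : l.filter (fun p => p.1.1 == w) = [] := by
      rw [List.filter_eq_nil_iff]
      intro q hq hq1
      exact hw (by
        have h1 : q.1.1 = w := by simpa using hq1
        exact h1 ▸ List.mem_map_of_mem hq)
    unfold bep_reshapeStep
    simp only
    rw [hgetD]
    apply PySem.Dict.ext
    rw [PySem.Dict.items_insert_of_not_contains _ _ hcontains]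
    show ((PySem.Set.ofList (l.map (fun p => p.1.1))).map _) ++ _
      = (bep_dictG (l ++ [((w, t), v)])).items
    unfold bep_dictG
    rw [hwords, List.map_append, List.map_singleton]
    congr 1
    · refine List.map_congr_left (fun w' hw' => ?_)
      have he : w' ≠ w := fun h => hw (by simpa [PySem.Set.mem_ofList, h] using hw')
      rw [List.filter_append]
      have hne2 : ¬(w = w') := fun h => he h.symm
      have : List.filter (fun q => q.1.1 == w') [((w, t), v)] = [] := by
        simp [hne2]
      rw [this, List.append_nil]
    · rw [List.filter_append, hfl1, hempty]
      rfl

lemma bep_foldG (l : List ((String × String) × Int)) (h : (l.map Prod.fst).Nodup) :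
    l.foldl bep_reshapeStep PySem.Dict.empty = bep_dictG l := by
  induction l using List.reverseRecOn with
  | nil => rfl
  | append_singleton l p ih =>
    rw [List.map_append] at h
    have h1 := (List.nodup_append.1 h).1
    have h2 : p.1 ∉ l.map Prod.fst := by
      intro hmem
      exact ((List.nodup_append.1 h).2.2 p.1 hmem p.1 (by simp)) rfl
    rw [List.foldl_append, List.foldl_cons, List.foldl_nil, ih h1, bep_dictG_snoc l p h2]

lemma bep_ofList_map_ofList {α β : Type} [BEq α] [LawfulBEq α] [BEq β] [LawfulBEq β]
    (xs : List α) (f : α → β) :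
    PySem.Set.ofList ((PySem.Set.ofList xs).map f) = PySem.Set.ofList (xs.map f) := by
  induction xs using List.reverseRecOn with
  | nil => rfl
  | append_singleton xs x ih =>
    rw [bep_setOfList_snoc, List.map_append, List.map_singleton, bep_setOfList_snoc]
    by_cases hx : x ∈ xs
    · rw [if_pos hx, if_pos (List.mem_map_of_mem hx), ih]
    · rw [if_neg hx, List.map_append, List.map_singleton, bep_setOfList_snoc, ih]
      by_cases hf : f x ∈ xs.map f
      · rw [if_pos (by simpa [PySem.Set.mem_ofList] using hf), if_pos hf]
      · rw [if_neg (by simpa [PySem.Set.mem_ofList] using hf), if_neg hf]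

lemma bep_dictG_counter (ps : List (String × String)) :
    bep_dictG ((PySem.Dict.counter ps).items) = bep_dictA ps := by
  unfold bep_dictG bep_dictA bep_wordsP
  rw [PySem.Dict.items_counter]
  have hmm : ((PySem.Set.ofList ps).map (fun k => (k, (ps.count k : Int)))).map
      (fun p => p.1.1) = (PySem.Set.ofList ps).map Prod.fst := by
    rw [List.map_map]; rfl
  rw [hmm, bep_ofList_map_ofList]
  refine congrArg _ (List.map_congr_left (fun w hw => ?_))
  congr 1
  apply PySem.Dict.ext
  show (((PySem.Set.ofList ps).map (fun k => (k, (ps.count k : Int)))).filter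
      (fun p => p.1.1 == w)).map (fun p => (p.1.2, p.2)) = bep_tagsP ps w
  unfold bep_tagsP
  rw [List.filter_map, List.map_map]
  rfl

-- ===== VERDICT (by name: the statement is the Claim_ definition above) =====
theorem build_emission_probabilities_spec : Claim_equal_build_emission_probabilities := by
  intro train _
  unfold Spec_build_emission_probabilities
  show ((train.foldl (fun ep line => line.foldl bep_stepA ep) PySem.Dict.empty).items.map
      (fun p => (p.1, p.2.items)))
    = (((train.foldl (fun c line => line.foldl bep_countStep c)
        PySem.Dict.empty).items.foldl bep_reshapeStep PySem.Dict.empty).items.map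
      (fun p => (p.1, p.2.items)))
  rw [← List.foldl_flatten, ← List.foldl_flatten]
  have hc : (train.flatten).foldl bep_countStep PySem.Dict.empty =
      PySem.Dict.counter train.flatten :=
    PySem.Dict.foldl_insert_getD_add_one_eq_counter _
  have hnodup : (((PySem.Dict.counter train.flatten).items.map Prod.fst)).Nodup := by
    have := PySem.Dict.nodup_keys_counter (κ := String × String) train.flatten
    simpa [PySem.Dict.keys] using this
  rw [hc, bep_foldA, bep_foldG _ hnodup, bep_dictG_counter]
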